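/- GENERATED by mk_final_copies.py from the proof of the farm's unit `start_decoder.R14` (farm:start_decoder.R14.2: Lemmas.lean) as the
   re-elaboration sweep compiled it — do not edit. -/
import Asan.CheckWalk
import Vorbis.Spec.Units.start_decoder_R14

open X86 X86.User Asan Vorbis Vorbis.Spec Vorbis.Spec.StartDecoder

set_option maxRecDepth 4000
set_option maxHeartbeats 1000000

namespace Vorbis.Spec.start_decoder_R14

/-! ### The memory-dependent part of the mode loop's invariant, and its frame lemma -/

/-- **What segment R14 carries from one callee return to the next**: the memory-dependent fields of `Frame` (the saved registers,
the shadow index, the shadow layer, SH7, the function's footprint) and of `ModeLoop` (`Mid g 8 8 9`, `ModeUpTo`, `i < mode_count`),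
for an arbitrary memory `mem` (the registers and `rip` are the walker's business). -/
structure Inv (g : Ghost) (i : Nat) (A : Arena × List Obj) (mem : Mem) : Prop where
  shadowIdx : mem.u64 (g.R + 8) = (g.R + 0x50) / 8
  saved_rbx : mem.u64 (g.R + 0x598) = (g.e.reg .rbx).toNat
  saved_rbp : mem.u64 (g.R + 0x5a0) = (g.e.reg .rbp).toNat
  saved_r12 : mem.u64 (g.R + 0x5a8) = (g.e.reg .r12).toNat
  saved_r13 : mem.u64 (g.R + 0x5b0) = (g.e.reg .r13).toNat
  saved_r14 : mem.u64 (g.R + 0x5b8) = (g.e.reg .r14).toNat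
  saved_r15 : mem.u64 (g.R + 0x5c0) = (g.e.reg .r15).toNat
  saved_ra : mem.u64 (g.R + 0x5c8) = g.ret.toNat
  shadow : ShadowInv A.2 g.frames' g.R mem
  sh7 : Log2_4In mem
  same : Mem.SameExcept (footprint g) g.e.mem mem
  mid : Mid g 8 8 9 A.1 A mem
  lt : (i : Int) < stb_vorbis.mode_count mem g.f
  modes : ModeUpTo mem g.f i

/-- The entry assertion of the segment gives the carried invariant for the entry memory. -/
theorem Inv.of_loop {u₀ : State} {g : Ghost} {pc : Word} {i : Nat} {A : Arena × List Obj} {v : State}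
    (h : ModeLoop u₀ g pc i A v) (hlt : (i : Int) < stb_vorbis.mode_count v.mem g.f) : Inv g i A v.mem :=
  { shadowIdx := h.frame.shadowIdx
    saved_rbx := h.frame.saved_rbx
    saved_rbp := h.frame.saved_rbp
    saved_r12 := h.frame.saved_r12
    saved_r13 := h.frame.saved_r13
    saved_r14 := h.frame.saved_r14
    saved_r15 := h.frame.saved_r15
    saved_ra := h.frame.saved_ra
    shadow := h.frame.shadow
    sh7 := h.frame.sh7
    same := h.frame.same
    mid := h.mid
    lt := hlt
    modes := h.modes }

/-- **Where a batch of stores of the segment (or a callee's footprint) may go**: the stack below the steady stack pointer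
(return addresses, the callees' frames), or one of the windows of `*f` that neither `Mid g 8 8 9` nor `ModeUpTo … i` reads: the
readers' fields, `error`, and the mode records from `i` on. -/
def Allowed (g : Ghost) (i : Nat) (w : Span) : Prop :=
  (g.RA - 1888 ≤ w.lo ∧ w.hi ≤ g.R) ∨
  (g.f + 48 ≤ w.lo ∧ w.hi ≤ g.f + 56) ∨
  (g.f + 84 ≤ w.lo ∧ w.hi ≤ g.f + 96) ∨
  (g.f + 136 ≤ w.lo ∧ w.hi ≤ g.f + 144) ∨
  (g.f + 484 + 6 * i ≤ w.lo ∧ w.hi ≤ g.f + 868) ∨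
  (g.f + 1484 ≤ w.lo ∧ w.hi ≤ g.f + 1749) ∨
  (g.f + 1752 ≤ w.lo ∧ w.hi ≤ g.f + 1784)

/-- The own frame's objects are live besides the callers'. -/
theorem ownFrames_sub (g : Ghost) (others : List Obj) (o : Obj) (ho : o ∈ stackObjs g.frames ++ others) :
    o ∈ stackObjs g.frames' ++ others := by
  unfold Ghost.frames'
  rw [stackObjs_cons]
  rcases List.mem_append.mp ho with h1 | h2
  · exact List.mem_append_left _ (List.mem_append_right _ h1)
  · exact List.mem_append_right _ h2

/-- **Where `*f` is**: in the data space above the image, and off start_decoder's own stack `[RA − 1888, RA + 8)`: it is an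
object of a caller's protected frame (above the return address: `Frame.callers`) or a non-stack object. -/
theorem obj_where {u₀ : State} {g : Ghost} {pc : Word} {A : Arena × List Obj} {v : State} {mem : Mem}
    (hfr : Frame u₀ g pc A v) (hh : g.Hand A) (hsh : ShadowInv A.2 g.frames' g.R mem) :
    0x119d40 ≤ g.f ∧ g.f + 1808 ≤ 0xC00000 ∧ (g.RA + 8 ≤ g.f ∨ g.f + 1808 ≤ 0x700000 ∨ 0x800000 ≤ g.f) := by
  have hobj : LiveIn A.2 g.frames' g.f Off.sizeof.stb_vorbis := hh.obj.mono (ownFrames_sub g A.2)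
  have hw := hobj.where_ hsh hfr.offText (by decide)
  simp only [Off.sizeof.stb_vorbis] at hw
  obtain ⟨w1, w2, _⟩ := hw
  refine ⟨w1, w2, ?_⟩
  obtain ⟨o, ho, h1, h2⟩ := hh.obj
  simp only [Off.sizeof.stb_vorbis] at h2
  rcases List.mem_append.mp ho with hs | hoth
  · -- an object of a caller's frame
    left
    unfold stackObjs at hs
    obtain ⟨bF, hbF, hin⟩ := List.mem_flatMap.mp hs
    have hmem : bF ∈ g.frames' := List.mem_cons_of_mem _ hbF
    obtain ⟨k1, k2, _, _, _⟩ := hsh.stack.active bF hmem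
    obtain ⟨g1, _⟩ := FrameLayout.objsAt_gran k1 k2 hin
    have hc := hfr.callers bF hbF
    have e1 : o.gLo = o.base / 8 := rfl
    omega
  · -- a non-stack object
    right
    have hoff : OffStack o := hsh.off o hoth
    unfold OffStack at hoff
    omega

/-- The end of the fields `Mid g 8 …` reads, as a number. -/
theorem midHi8 : Mid.hi 8 = 480 := by decide

/-- The start of the zero rest at point 9, as a number. -/
theorem rest9 : restFrom 9 = 868 := by decide

/-- **FRAME of the carried invariant** over a batch of stores / a callee's footprint `ws` every span of which is `Allowed`:
below the steady stack pointer, or in a field of `*f` that the invariant does not read. `Bits` for the new memory is the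
caller's (the reader's post, or `Bits.frame_fields`). -/
theorem Inv.step {u₀ : State} {g : Ghost} {pc : Word} {i : Nat} {A : Arena × List Obj} {v : State} {mem mem' : Mem}
    {ws : List Span} (hfr : Frame u₀ g pc A v) (hh : g.Hand A) (h : Inv g i A mem)
    (hs : Mem.SameExcept ws mem mem') (hw : ∀ w, w ∈ ws → Allowed g i w)
    (hbits : Bits (g.Blk A) g.len mem' g.f) : Inv g i A mem' := by
  obtain ⟨ra1, ra2, ra3⟩ := hfr.ra
  obtain ⟨re1, re2⟩ := hfr.r_eq
  simp only [depth, steady] at ra2 re1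
  obtain ⟨fw1, fw2, fw3⟩ := obj_where hfr hh h.shadow
  have hmd1 := h.modes.MD1
  have hlt := h.lt
  have hi64 : i < 64 := by omega
  -- the stack from the steady stack pointer up to the return address is untouched
  have stackEq : Mem.EqOn g.R (g.RA + 8) mem mem' := by
    apply hs.eqOn
    intro w hw'
    have := hw w hw'
    unfold Allowed at this
    omega
  -- the shadow is untouched
  have shEq : Mem.EqOn 0xC00000 0xE00000 mem mem' := by
    apply hs.eqOn
    intro w hw'
    have := hw w hw'
    unfold Allowed at this
    omega
  -- the fields of `*f` outside the allowed windows
  have objEq : ∀ lo hi : Nat, hi ≤ 1808 →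
      (hi ≤ 48 ∨ (56 ≤ lo ∧ hi ≤ 84) ∨ (96 ≤ lo ∧ hi ≤ 136) ∨ (144 ≤ lo ∧ hi ≤ 484 + 6 * i) ∨ (868 ≤ lo ∧ hi ≤ 1484) ∨
        (1749 ≤ lo ∧ hi ≤ 1752) ∨ 1784 ≤ lo) → Mem.EqOn (g.f + lo) (g.f + hi) mem mem' := by
    intro lo hi hhi hc
    apply hs.eqOn
    intro w hw'
    have := hw w hw'
    unfold Allowed at this
    omega
  have hf64 : g.f + Off.sizeof.stb_vorbis ≤ 2 ^ 64 := by
    simp only [Off.sizeof.stb_vorbis]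
    omega
  -- every block of the arena is kept: it lies inside the arena's buffer, off the stack, and `*f` is outside the buffer
  have hkept : ∀ B, A.1.Blk B → B.Kept mem mem' := by
    intro B hB
    have hin := arena_inside h.mid.arena hB
    have hoff := h.mid.arena.blk_off_stack hB
    have hout := hh.objOut
    simp only [Off.sizeof.stb_vorbis] at hout
    have hnw := h.mid.env.ok.no_wrap (runBlk_setup (extra := objBlock g.f :: fixedBlocks g.len) hB)
    apply Block.Kept.of_sameExcept hs _ hnw
    intro w hw'
    have := hw w hw'
    unfold Allowed at this
    omega
  have hmid : Mid g 8 8 9 A.1 A mem' := by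
    apply h.mid.frame
    · apply ObjEq.of_sameExcept hs
      · intro w hw'
        simp only [Mid.winsAt, midHi8, rest9, List.mem_cons, List.mem_nil_iff, or_false] at hw'
        rcases hw' with rfl | rfl | rfl | rfl | rfl | rfl <;> simp only [] <;> omega
      · intro w hw' s hs'
        have := hw s hs'
        unfold Allowed at this
        simp only [Mid.winsAt, midHi8, rest9, List.mem_cons, List.mem_nil_iff, or_false] at hw'
        rcases hw' with rfl | rfl | rfl | rfl | rfl | rfl <;> simp only [] <;> omega
    · exact hkept
    · exact h.mid.consts.frame (stackEq.mono (by omega) (by omega)) (by omega)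
    · intro _ _
      exact stackEq.i32 _ (by omega) (by omega) (by omega)
    · exact shEq
    · apply h.mid.arena.frame hf64
      simp only [voff]
      exact objEq 112 136 (by omega) (by omega)
    · exact hbits
  have hmodes : ModeUpTo mem' g.f i := by
    apply h.modes.transfer_below
    apply ObjEq.of_sameExcept hs
    · intro w hw'
      simp only [ModeUpTo.wins, List.mem_cons, List.mem_nil_iff, or_false] at hw'
      rcases hw' with rfl | rfl <;> simp only [] <;> omega
    · intro w hw' s hs'
      have := hw s hs'
      unfold Allowed at this
      simp only [ModeUpTo.wins, List.mem_cons, List.mem_nil_iff, or_false] at hw'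
      rcases hw' with rfl | rfl <;> simp only [] <;> omega
  have hcount : stb_vorbis.mode_count mem' g.f = stb_vorbis.mode_count mem g.f := by
    simp only [vacc, voff]
    exact (objEq 480 484 (by omega) (by omega)).i32 _ (by omega) (by omega) (by omega)
  -- `*f` and the global `log2_4` are two different allocated blocks
  have hlog : g.f + 1808 ≤ 0x120640 ∨ 0x120650 ≤ g.f := by
    have hob : g.Blk A (objBlock g.f) := hbits.OB1
    have hgl : g.Blk A ⟨0x120640, 16⟩ := by
      apply runBlk_extra
      simp only [fixedBlocks, globalBlocks, List.mem_cons, true_or, or_true]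
    rcases h.mid.env.ok.apart _ _ hob hgl with e | d
    · have e2 := congrArg Block.size e
      simp only [objBlock, Off.sizeof.stb_vorbis] at e2
      omega
    · simp only [vblock, Off.sizeof.stb_vorbis] at d
      omega
  refine
    { shadowIdx := ?_, saved_rbx := ?_, saved_rbp := ?_, saved_r12 := ?_, saved_r13 := ?_, saved_r14 := ?_, saved_r15 := ?_,
      saved_ra := ?_, shadow := h.shadow.untouched shEq, sh7 := ?_, same := ?_, mid := hmid, lt := ?_, modes := hmodes }
  · rw [stackEq.u64 _ (by omega) (by omega) (by omega)]
    exact h.shadowIdx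
  · rw [stackEq.u64 _ (by omega) (by omega) (by omega)]
    exact h.saved_rbx
  · rw [stackEq.u64 _ (by omega) (by omega) (by omega)]
    exact h.saved_rbp
  · rw [stackEq.u64 _ (by omega) (by omega) (by omega)]
    exact h.saved_r12
  · rw [stackEq.u64 _ (by omega) (by omega) (by omega)]
    exact h.saved_r13
  · rw [stackEq.u64 _ (by omega) (by omega) (by omega)]
    exact h.saved_r14
  · rw [stackEq.u64 _ (by omega) (by omega) (by omega)]
    exact h.saved_r15
  · rw [stackEq.u64 _ (by omega) (by omega) (by omega)]
    exact h.saved_ra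
  · -- SH7: the table `log2_4` is off the stack and off `*f`
    intro j hj
    have e : (UInt64.ofNat (Vorbis.Globals.log2_4.beg + j)).toNat = 0x120640 + j := by
      show (addr (0x120640 + j)).toNat = _
      exact toNat_addr _ (by omega)
    rw [hs.readLE _ 1 (by omega) ?_]
    · exact h.sh7 j hj
    · intro w hw'
      have := hw w hw'
      unfold Allowed at this
      omega
  · -- the function's footprint: the own stack and `*f`
    apply h.same.step_same hs
    intro w hw' a h1 h2
    have := hw w hw'
    unfold Allowed at this
    by_cases hst : g.RA - 1888 ≤ a ∧ a < g.RA
    · refine ⟨⟨g.RA - depth, g.RA⟩, List.mem_cons_self, ?_, ?_⟩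
      · exact hst.1
      · exact hst.2
    · refine ⟨(objBlock (g.e.reg .rdi).toNat).span, List.mem_cons_of_mem _ List.mem_cons_self, ?_, ?_⟩
      · show g.f ≤ a
        omega
      · show a < g.f + Off.sizeof.stb_vorbis
        simp only [Off.sizeof.stb_vorbis]
        omega
  · rw [hcount]
    exact h.lt

/-! ### The instances of the frame lemma that the segment uses -/

/-- The numbers of the frame, for `omega`: `R + 1480 = RA`, RA in the stack region. -/
theorem nums {u₀ : State} {g : Ghost} {pc : Word} {A : Arena × List Obj} {v : State} (hfr : Frame u₀ g pc A v) :
    g.R + 1480 = g.RA ∧ g.RA % 8 = 0 ∧ 0x700000 + 1888 ≤ g.RA ∧ g.RA + 8 ≤ 0x800000 ∧ g.RA = (g.e.reg .rsp).toNat ∧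
      g.f = (g.e.reg .rdi).toNat := by
  obtain ⟨ra1, ra2, ra3⟩ := hfr.ra
  obtain ⟨re1, _⟩ := hfr.r_eq
  simp only [depth, steady] at ra2 re1
  exact ⟨re1, ra1, ra2, ra3, rfl, rfl⟩

/-- **One store of the segment at the word `a`** — below the steady stack pointer (the return address of a call), or into the
mode record `i` — keeps the carried invariant. -/
theorem Inv.store {u₀ : State} {g : Ghost} {pc : Word} {i : Nat} {A : Arena × List Obj} {v : State} {mem : Mem}
    (hfr : Frame u₀ g pc A v) (hh : g.Hand A) (h : Inv g i A mem) (a : Word) (n x : Nat)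
    (ha : (g.RA - 1888 ≤ a.toNat ∧ a.toNat + n ≤ g.R) ∨ (g.f + 484 + 6 * i ≤ a.toNat ∧ a.toNat + n ≤ g.f + 484 + 6 * i + 6)) :
    Inv g i A (mem.writeLE a n x) := by
  obtain ⟨n1, n2, n3, n4, _, _⟩ := nums hfr
  obtain ⟨fw1, fw2, fw3⟩ := obj_where hfr hh h.shadow
  have hmd1 := h.modes.MD1
  have hlt := h.lt
  have hi64 : i < 64 := by omega
  have hs : Mem.SameExcept [⟨a.toNat, a.toNat + n⟩] mem (mem.writeLE a n x) := by
    apply Mem.SameExcept.writeLE _ _ _ _ _ (by omega)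
    exact ⟨_, List.mem_cons_self, Nat.le_refl _, Nat.le_refl _⟩
  apply h.step hfr hh hs
  · intro w hw
    have e := List.mem_singleton.mp hw
    subst e
    unfold Allowed
    simp only []
    omega
  · apply h.mid.bits.frame_fields
    apply Bits.SameFields.of_writeLE_word mem g.f a n x (by omega) <;> omega

/-- **The precondition of `get_bits(f, n)`** at a call of the segment: the state `s` at the callee's first instruction has
`rsp = R − 8`, `rdi = f`, `n ≤ 32`, and the carried invariant holds for its memory (the pushed return address: `Inv.store`). -/
theorem getbits_pre {u₀ : State} {g : Ghost} {pc : Word} {i : Nat} {A : Arena × List Obj} {v s : State}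
    (hfr : Frame u₀ g pc A v) (hh : g.Hand A) (h : Inv g i A s.mem) (hrsp : s.reg .rsp = g.e.reg .rsp - 1488)
    (hrdi : s.reg .rdi = g.e.reg .rdi) (hn : bitsArg s ≤ 32) :
    (get_bits.spec A.2 g.frames' (g.Blk A) g.len).pre s := by
  obtain ⟨n1, n2, n3, n4, n5, n6⟩ := nums hfr
  have e1 : (s.reg .rsp).toNat + 8 = g.R := by
    rw [hrsp]
    u_omega
  have e2 : (s.reg .rdi).toNat = g.f := by
    rw [hrdi]
    rfl
  refine ⟨⟨⟨?_, hfr.offText⟩, ?_, ?_⟩, hn⟩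
  · rw [e1]
    exact h.shadow
  · rw [e2]
    exact ⟨h.mid.env.live, hh.obj.mono (ownFrames_sub g A.2), fun hl => (hh.inp hl).mono (ownFrames_sub g A.2)⟩
  · rw [e2]
    exact h.mid.bits

/-- **After `get_bits` returned**: its footprint (the stack below `R − 8`, the reader's windows of `*f`) keeps the carried
invariant; `Bits` is its post. The result is in range. -/
theorem getbits_post {u₀ : State} {g : Ghost} {pc : Word} {i : Nat} {A : Arena × List Obj} {v s r : State}
    (hfr : Frame u₀ g pc A v) (hh : g.Hand A) (h : Inv g i A s.mem) (hrsp : s.reg .rsp = g.e.reg .rsp - 1488)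
    (hrdi : s.reg .rdi = g.e.reg .rdi)
    (hsame : Mem.SameExcept ((get_bits.spec A.2 g.frames' (g.Blk A) g.len).footprint s) s.mem r.mem)
    (hpost : (get_bits.spec A.2 g.frames' (g.Blk A) g.len).post s r) :
    Inv g i A r.mem ∧ GetBitsResult (bitsArg s) (r.reg .rax).toNat := by
  obtain ⟨n1, n2, n3, n4, n5, n6⟩ := nums hfr
  have e1 : (s.reg .rsp).toNat + 8 = g.R := by
    rw [hrsp]
    u_omega
  have e2 : (s.reg .rdi).toNat = g.f := by
    rw [hrdi]
    rfl
  have hp : GetBitsSpecPost (g.Blk A) g.len (s.reg .rdi).toNat (bitsArg s) s r := hpost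
  rw [e2] at hp
  refine ⟨?_, hp.bits.result⟩
  apply h.step hfr hh hsame _ hp.bits.bits
  intro w hw
  simp only [X86.User.Spec.footprint, vspec, e2, List.mem_cons, List.mem_nil_iff, or_false] at hw
  unfold Allowed
  rcases hw with rfl | rfl | rfl | rfl | rfl | rfl <;> simp only [] <;> omega

/-- **The precondition of `error(f, e)`** at a call of the segment. -/
theorem error_pre {u₀ : State} {g : Ghost} {pc : Word} {i : Nat} {A : Arena × List Obj} {v s : State}
    (hfr : Frame u₀ g pc A v) (hh : g.Hand A) (h : Inv g i A s.mem) (hrsp : s.reg .rsp = g.e.reg .rsp - 1488)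
    (hrdi : s.reg .rdi = g.e.reg .rdi) : (error.spec A.2 g.frames').pre s := by
  obtain ⟨n1, n2, n3, n4, n5, n6⟩ := nums hfr
  have e1 : (s.reg .rsp).toNat + 8 = g.R := by
    rw [hrsp]
    u_omega
  have e2 : (s.reg .rdi).toNat = g.f := by
    rw [hrdi]
    rfl
  refine ⟨⟨?_, hfr.offText⟩, ?_⟩
  · rw [e1]
    exact h.shadow
  · rw [e2]
    exact hh.obj.mono (ownFrames_sub g A.2)

/-- **After `error` returned**: it wrote `f->error` and its own stack only; the carried invariant is kept. -/
theorem error_post {u₀ : State} {g : Ghost} {pc : Word} {i : Nat} {A : Arena × List Obj} {v s r : State}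
    (hfr : Frame u₀ g pc A v) (hh : g.Hand A) (h : Inv g i A s.mem) (hrsp : s.reg .rsp = g.e.reg .rsp - 1488)
    (hrdi : s.reg .rdi = g.e.reg .rdi)
    (hsame : Mem.SameExcept ((error.spec A.2 g.frames').footprint s) s.mem r.mem) : Inv g i A r.mem := by
  obtain ⟨n1, n2, n3, n4, n5, n6⟩ := nums hfr
  obtain ⟨fw1, fw2, fw3⟩ := obj_where hfr hh h.shadow
  have e1 : (s.reg .rsp).toNat + 8 = g.R := by
    rw [hrsp]
    u_omega
  have e2 : (s.reg .rdi).toNat = g.f := by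
    rw [hrdi]
    rfl
  have hw : ∀ w, w ∈ (error.spec A.2 g.frames').footprint s → Allowed g i w := by
    intro w hw
    simp only [X86.User.Spec.footprint, vspec, e2, voff, List.mem_cons, List.mem_nil_iff, or_false] at hw
    unfold Allowed
    rcases hw with rfl | rfl <;> simp only [] <;> omega
  apply h.step hfr hh hsame hw
  apply h.mid.bits.frame_fields
  apply Bits.SameFields.of_sameExcept hsame
  all_goals
    intro w hw'
    simp only [X86.User.Spec.footprint, vspec, e2, voff, List.mem_cons, List.mem_nil_iff, or_false] at hw'
    rcases hw' with rfl | rfl <;> simp only [] <;> omega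

/-- `get_bits` writes no byte of `mode_config[64]`: what the segment has stored into record `i` so far is still there. -/
theorem getbits_keep {u₀ : State} {g : Ghost} {pc : Word} {i : Nat} {A : Arena × List Obj} {v s r : State}
    (hfr : Frame u₀ g pc A v) (hh : g.Hand A) (h : Inv g i A s.mem) (hrsp : s.reg .rsp = g.e.reg .rsp - 1488)
    (hrdi : s.reg .rdi = g.e.reg .rdi)
    (hsame : Mem.SameExcept ((get_bits.spec A.2 g.frames' (g.Blk A) g.len).footprint s) s.mem r.mem) :
    Mem.EqOn (g.f + 484) (g.f + 868) s.mem r.mem := by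
  obtain ⟨n1, n2, n3, n4, n5, n6⟩ := nums hfr
  obtain ⟨fw1, fw2, fw3⟩ := obj_where hfr hh h.shadow
  have e1 : (s.reg .rsp).toNat + 8 = g.R := by
    rw [hrsp]
    u_omega
  have e2 : (s.reg .rdi).toNat = g.f := by
    rw [hrdi]
    rfl
  apply hsame.eqOn
  intro w hw
  simp only [X86.User.Spec.footprint, vspec, e2, List.mem_cons, List.mem_nil_iff, or_false] at hw
  rcases hw with rfl | rfl | rfl | rfl | rfl | rfl <;> simp only [] <;> omega

/-- **A check site of the segment**: `n` bytes at offset `off` of `*f` (a field of mode record `i`, `mapping_count`), in a memory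
whose shadow is that of the carried invariant's. -/
theorem check_field {g : Ghost} {i : Nat} {A : Arena × List Obj} {mem mem' : Mem} (h : Inv g i A mem)
    (hun : ShadowUntouched mem mem') (b : Word) (off n : Nat) (hb : b.toNat = g.f + off) (ho : off + n ≤ 1808) (hn : 1 ≤ n) :
    AccSmall n mem' b := by
  have hs : Site (g.Live A) (g.f + off) n := h.mid.bits.site_field h.mid.env.live off n ho hn rfl
  exact Vorbis.Spec.check_site h.shadow hun hs hb

/-- **`Frame` at another program counter**, from the carried invariant, the walker's facts and the static fields of the entry's. -/
theorem frame_at {u₀ : State} {g : Ghost} {pc : Word} {i : Nat} {A : Arena × List Obj} {v w : State}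
    (hfr : Frame u₀ g pc A v) (h : Inv g i A w.mem) (pc' : Word) (hrip : w.rip = pc')
    (hrsp : w.reg .rsp = g.e.reg .rsp - 1480) (hcode : Mem.EqOn L.textLo L.textHi u₀.mem w.mem) (hinv : abiInv w) :
    Frame u₀ g pc' A w := by
  obtain ⟨n1, n2, n3, n4, n5, n6⟩ := nums hfr
  have e : w.reg .rsp = addr g.R := by
    rw [hrsp]
    apply UInt64.toNat_inj.mp
    rw [toNat_addr _ (by omega)]
    u_omega
  exact
    { entry := hfr.entry, rip := hrip, rsp := e, shadowIdx := h.shadowIdx, saved_rbx := h.saved_rbx, saved_rbp := h.saved_rbp,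
      saved_r12 := h.saved_r12, saved_r13 := h.saved_r13, saved_r14 := h.saved_r14, saved_r15 := h.saved_r15,
      saved_ra := h.saved_ra, code := hcode, inv := hinv, shadow := h.shadow, offText := hfr.offText, ext := hfr.ext,
      callers := hfr.callers, sh7 := h.sh7, same := h.same }

/-- **The error exit** (`call error ; jmp 113b22`): `AtERR` with eax = 0; SD.ERR from the finished groups (`Mid.failed_late`). -/
theorem exit_err {u₀ : State} {g : Ghost} {pc : Word} {i : Nat} {A : Arena × List Obj} {v w : State}
    (hfr : Frame u₀ g pc A v) (hh : g.Hand A) (h : Inv g i A w.mem) (hrip : w.rip = pc_ERR)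
    (hrsp : w.reg .rsp = g.e.reg .rsp - 1480) (hcode : Mem.EqOn L.textLo L.textHi u₀.mem w.mem) (hinv : abiInv w)
    (hrax : w.reg .rax = 0) : AtERR u₀ g w := by
  refine ⟨A, frame_at hfr h pc_ERR hrip hrsp hcode hinv, hh, Or.inl ⟨?_, h.mid.failed_late (by omega)⟩⟩
  rw [hrax]
  rfl

/-- **The exit to the loop head** (`++i ; jmp 115f67`): `AtR13 (i + 1)`; the record `i` is well formed (MD2). -/
theorem exit_next {u₀ : State} {g : Ghost} {pc : Word} {i : Nat} {A : Arena × List Obj} {v w : State}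
    (hfr : Frame u₀ g pc A v) (hh : g.Hand A) (h : Inv g i A w.mem) (hrip : w.rip = pc_R13)
    (hrsp : w.reg .rsp = g.e.reg .rsp - 1480) (hcode : Mem.EqOn L.textLo L.textHi u₀.mem w.mem) (hinv : abiInv w)
    (hrbp : w.reg .rbp = g.e.reg .rdi) (hr14 : w.reg .r14 = addr (i + 1)) (hrec : ModeRecOK w.mem g.f i) :
    AtR13 u₀ g (i + 1) w := by
  have hm := h.modes.succ h.lt hrec
  have hrbp' : w.reg .rbp = addr g.f := by
    rw [hrbp]
    exact (addr_toNat _).symm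
  exact ⟨A, frame_at hfr h pc_R13 hrip hrsp hcode hinv, hh, h.mid, hrbp', hr14, hm.n_le, hm⟩

/-- The address of mode record `i`, as the segment computes it (`movsxd rax, r14d ; imul rax, rax, 6 ; lea rbx, [rbp+rax+1e4H]`). -/
theorem rbx_eq (p : Word) (i : Nat) (hi : i < 64) :
    p + Word.ofBV (BitVec.signExtend 64 (Word.part Width.w32 (addr i))) * 6 + 484 = p + UInt64.ofNat (484 + 6 * i) := by
  have e1 : (Word.part Width.w32 (addr i)).toNat = i := by
    rw [Vorbis.toNat_part32, toNat_addr _ (by omega)]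
    omega
  have e2 : (Word.ofBV (BitVec.signExtend 64 (Word.part Width.w32 (addr i)))).toNat = i := by
    rw [Vorbis.Spec.toNat_sext32 _ (by omega)]
    exact e1
  generalize Word.ofBV (BitVec.signExtend 64 (Word.part Width.w32 (addr i))) = y at e2
  apply UInt64.toNat_inj.mp
  u_omega

/-- The register form of the record's address is the `addr` of the number. -/
theorem rec_addr (g : Ghost) (i : Nat) : g.e.reg .rdi + UInt64.ofNat (484 + 6 * i) = addr (g.f + 484 + 6 * i) := by
  have e : g.e.reg .rdi = addr g.f := (addr_toNat _).symm
  rw [e, addr_add, Nat.add_assoc]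

/-- **`m->blockflag` survives a call of `get_bits`**: neither the pushed return address nor the reader's footprint meets the record. -/
theorem bf_keep {u₀ : State} {g : Ghost} {pc : Word} {i : Nat} {A : Arena × List Obj} {v s r : State}
    (hfr : Frame u₀ g pc A v) (hh : g.Hand A) (h : Inv g i A s.mem) (hrsp : s.reg .rsp = g.e.reg .rsp - 1488)
    (hrdi : s.reg .rdi = g.e.reg .rdi)
    (hsame : Mem.SameExcept ((get_bits.spec A.2 g.frames' (g.Blk A) g.len).footprint s) s.mem r.mem)
    (m : Mem) (x : Nat) (hm : s.mem = m.writeLE (g.e.reg .rsp - 1488) 8 x) :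
    r.mem.u8 (g.f + 484 + 6 * i) = m.u8 (g.f + 484 + 6 * i) := by
  obtain ⟨n1, n2, n3, n4, n5, n6⟩ := nums hfr
  obtain ⟨fw1, fw2, fw3⟩ := obj_where hfr hh h.shadow
  have hmd1 := h.modes.MD1
  have hlt := h.lt
  have hk := getbits_keep hfr hh h hrsp hrdi hsame
  rw [hk.u8 _ (by omega) (by omega) (by omega), hm]
  have e : (g.e.reg .rsp - 1488).toNat = g.RA - 1488 := by
    rw [n5]
    u_omega
  apply X86.User.Mem.u8_writeLE
  · omega
  · omega
  · omega

/-- The return address of a call of the segment is pushed below the steady stack pointer: the carried invariant is kept. -/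
theorem Inv.push {u₀ : State} {g : Ghost} {pc : Word} {i : Nat} {A : Arena × List Obj} {v : State} {mem : Mem}
    (hfr : Frame u₀ g pc A v) (hh : g.Hand A) (h : Inv g i A mem) (x : Nat) :
    Inv g i A (mem.writeLE (g.e.reg .rsp - 1488) 8 x) := by
  obtain ⟨n1, n2, n3, n4, n5, n6⟩ := nums hfr
  have e : (g.e.reg .rsp - 1488).toNat = g.RA - 1488 := by
    rw [n5]
    u_omega
  apply h.store hfr hh
  left
  omega

/-- A store of the segment into mode record `i` (`n` bytes at offset `off`, `off + n ≤ 6`) keeps the carried invariant. -/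
theorem Inv.rec_store {u₀ : State} {g : Ghost} {pc : Word} {i : Nat} {A : Arena × List Obj} {v : State} {mem : Mem}
    (hfr : Frame u₀ g pc A v) (hh : g.Hand A) (h : Inv g i A mem) (a : Word) (off n x : Nat)
    (ha : a.toNat = g.f + (484 + 6 * i) + off) (hon : off + n ≤ 6) : Inv g i A (mem.writeLE a n x) := by
  apply h.store hfr hh
  right
  omega

/-- The low byte of a value below 2 is at most 1 (`m->blockflag = get_bits(f, 1)`). -/
theorem byte_le_one (x : Word) (h : x.toNat < 2) : (BitVec.setWidth 8 (Word.part Width.w32 x)).toNat % 2 ^ 8 ≤ 1 := by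
  rw [BitVec.toNat_setWidth, Vorbis.toNat_part32]
  omega

/-- A store into mode record `i` at an offset `≥ 1` keeps `m->blockflag` (offset 0). -/
theorem u8_rec_store (g : Ghost) (i : Nat) (mem : Mem) (a : Word) (off n x : Nat)
    (ha : a.toNat = g.f + (484 + 6 * i) + off) (h1 : 1 ≤ off) (hon : off + n ≤ 6) (hf : g.f + 1808 ≤ 0xC00000) (hi : i < 64) :
    (mem.writeLE a n x).u8 (g.f + 484 + 6 * i) = mem.u8 (g.f + 484 + 6 * i) := by
  apply X86.User.Mem.u8_writeLE
  · omega
  · omega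
  · omega

/-- The pushed return address of a call of the segment keeps `m->blockflag`. -/
theorem u8_push {u₀ : State} {g : Ghost} {pc : Word} {i : Nat} {A : Arena × List Obj} {v : State} {mem0 : Mem}
    (hfr : Frame u₀ g pc A v) (hh : g.Hand A) (h : Inv g i A mem0) (mem : Mem) (x : Nat) :
    (mem.writeLE (g.e.reg .rsp - 1488) 8 x).u8 (g.f + 484 + 6 * i) = mem.u8 (g.f + 484 + 6 * i) := by
  obtain ⟨n1, n2, n3, n4, n5, n6⟩ := nums hfr
  obtain ⟨fw1, fw2, fw3⟩ := obj_where hfr hh h.shadow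
  have hmd1 := h.modes.MD1
  have hlt := h.lt
  have e : (g.e.reg .rsp - 1488).toNat = g.RA - 1488 := by
    rw [n5]
    u_omega
  apply X86.User.Mem.u8_writeLE
  · omega
  · omega
  · omega

/-! ### The walk, one lemma per returned callee state (stages 1 – 4: entry … the return of the fourth `get_bits`) -/

set_option maxHeartbeats 4000000

/-- **The state between two calls of the segment** (at the return of a `get_bits`): the registers the segment keeps (`rsp = R`,
`rbp = f`, `r14d = i`, `rbx = &mode_config[i]`), the code span, the ABI invariant, and the carried invariant of the memory. -/
structure Stage (u₀ : State) (g : Ghost) (i : Nat) (A : Arena × List Obj) (pc : Word) (s : State) : Prop where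
  rip : s.rip = pc
  rsp : s.reg .rsp = g.e.reg .rsp - 1480
  rbp : s.reg .rbp = g.e.reg .rdi
  r14 : s.reg .r14 = addr i
  rbx : s.reg .rbx = g.e.reg .rdi + UInt64.ofNat (484 + 6 * i)
  code : Mem.EqOn Vorbis.L.textLo Vorbis.L.textHi u₀.mem s.mem
  inv : abiInv s
  mem : Inv g i A s.mem

/-- Stage 1 (0x11655f – 0x11657b, C line 4144 – 4145): `m = f->mode_config + i`, `get_bits(f, 1)` called and returned. -/
theorem stage1 (Lay : Layout) (hLay : Lay.hi = 0x1000000) (μ : Microarch) (hμ : UserX.MicroOK μ) (u₀ : State)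
    (hcode : HasCodeNat Lay u₀ Vorbis.L.start_decoder.entry Vorbis.Code.code_start_decoder.nat Vorbis.L.start_decoder.size)
    (g : Ghost) (i : Nat) (A : Arena × List Obj) (v : State)
    (hgb : Calls Lay μ Vorbis.WayInv (Vorbis.conv u₀) Vorbis.L.get_bits.entry (get_bits.spec A.2 g.frames' (g.Blk A) g.len))
    (hloop : ModeLoop u₀ g pc_R14 i A v) (hlt : (i : Int) < stb_vorbis.mode_count v.mem g.f)
    (P : State → Prop)
    (hnext : ∀ s, Stage u₀ g i A Vorbis.L.start_decoder.cut312 s → (s.reg .rax).toNat < 2 → ReachVia Lay μ Vorbis.WayInv s P) :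
    ReachVia Lay μ Vorbis.WayInv v P := by
  have hfr := hloop.frame
  have hh := hloop.hand
  have hinv0 := Inv.of_loop hloop hlt
  have he := hfr.entry
  v_entry he
  obtain ⟨n1, n2, n3, n4, n5, n6⟩ := nums hfr
  obtain ⟨fw1, fw2, fw3⟩ := obj_where hfr hh hfr.shadow
  rw [n5] at n1 n2 n3 n4 fw3
  rw [n6] at fw1 fw2 fw3
  have hi64 : i < 64 := by
    have := hinv0.modes.MD1
    omega
  have h_rip := hfr.rip
  have c_rsp : v.reg .rsp = g.e.reg .rsp - 1480 := by
    rw [hfr.rsp]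
    apply UInt64.toNat_inj.mp
    rw [toNat_addr _ (by omega)]
    u_omega
  have c_rbp : v.reg .rbp = g.e.reg .rdi := by
    rw [hloop.rbp]
    exact addr_toNat _
  have c_r14 := hloop.r14
  have w_eq : Mem.EqOn Vorbis.L.textLo Vorbis.L.textHi u₀.mem v.mem := hfr.code
  have hdf : v.flags .df = false := (show abiInv _ from hfr.inv).1
  have hmx : v.mxcsr &&& 0x1F80 = 0x1F80 := (show abiInv _ from hfr.inv).2
  have hsse := Vorbis.sseOK_of_abiInv hfr.inv
  simp only [depth] at he_room he_stack
  u_walk hcode [hμ.vendor] until [Vorbis.L.start_decoder.cut4, Vorbis.L.start_decoder.cut272] span [Vorbis.L.textLo, Vorbis.L.textHi] side (v_side)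
  · v_inv
  · -- the precondition of get_bits(f, 1): the pushed return address lies below the steady stack pointer
    have hs : Inv g i A s_116576.mem := by
      rw [w_mem]
      refine hinv0.store hfr hh _ 8 _ (Or.inl ⟨?_, ?_⟩)
      · rw [n5]
        u_omega
      · u_omega
    refine getbits_pre hfr hh hs w_rsp w_rdi ?_
    rw [bitsArg_def, w_rsi]
    decide
  · -- 0x11657b: get_bits returned
    have hs : Inv g i A s_116576.mem := by
      rw [w_mem_116576]
      refine hinv0.store hfr hh _ 8 _ (Or.inl ⟨?_, ?_⟩)
      · rw [n5]
        u_omega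
      · u_omega
    obtain ⟨hr, hres⟩ := getbits_post hfr hh hs w_rsp_116576 w_rdi_116576 w_same w_post
    have e : bitsArg s_116576 = 1 := by
      rw [bitsArg_def, w_rsi_116576]
      decide
    rw [e] at hres
    refine hnext s_116576r ⟨w_rip, w_rsp, ?_, ?_, ?_, Vorbis.conv_code_eqOn w_code, w_inv, hr⟩ ?_
    · exact (w_kept .rbp rfl).trans c_rbp
    · exact (w_kept .r14 rfl).trans c_r14
    · rw [w_rbx]
      exact rbx_eq _ i hi64
    · exact hres.2 (by omega)


/-- Stage 2 (0x11657b – 0x116596, C lines 4145 – 4146): `m->blockflag = …` (store1 check, byte store), `get_bits(f, 16)`. -/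
theorem stage2 (Lay : Layout) (hLay : Lay.hi = 0x1000000) (μ : Microarch) (hμ : UserX.MicroOK μ) (u₀ : State)
    (hcode : HasCodeNat Lay u₀ Vorbis.L.start_decoder.entry Vorbis.Code.code_start_decoder.nat Vorbis.L.start_decoder.size)
    (g : Ghost) (i : Nat) (A : Arena × List Obj) (v : State)
    (hgb : Calls Lay μ Vorbis.WayInv (Vorbis.conv u₀) Vorbis.L.get_bits.entry (get_bits.spec A.2 g.frames' (g.Blk A) g.len))
    (hst1 : Asan.SmallCheck Lay μ Vorbis.WayInv (Vorbis.CodeOK u₀) [.rax, .rdx] 1 Vorbis.L.__asan_store1_noabort.entry)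
    (hfr : Frame u₀ g pc_R14 A v) (hh : g.Hand A)
    (P : State → Prop) (s : State) (hst : Stage u₀ g i A Vorbis.L.start_decoder.cut312 s) (hrax : (s.reg .rax).toNat < 2)
    (hnext : ∀ r, Stage u₀ g i A Vorbis.L.start_decoder.cut313 r → r.mem.u8 (g.f + 484 + 6 * i) ≤ 1 →
      ReachVia Lay μ Vorbis.WayInv r P) :
    ReachVia Lay μ Vorbis.WayInv s P := by
  have hinv0 := hst.mem
  have he := hfr.entry
  v_entry he
  obtain ⟨n1, n2, n3, n4, n5, n6⟩ := nums hfr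
  obtain ⟨fw1, fw2, fw3⟩ := obj_where hfr hh hfr.shadow
  rw [n5] at n1 n2 n3 n4 fw3
  rw [n6] at fw1 fw2 fw3
  have hi64 : i < 64 := by
    have := hinv0.modes.MD1
    have := hinv0.lt
    omega
  have h_rip := hst.rip
  have c_rsp := hst.rsp
  have c_rbp := hst.rbp
  have c_r14 := hst.r14
  have c_rbx := hst.rbx
  have w_eq := hst.code
  have hdf : s.flags .df = false := hst.inv.1
  have hmx : s.mxcsr &&& 0x1F80 = 0x1F80 := hst.inv.2
  have hsse := Vorbis.sseOK_of_abiInv hst.inv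
  simp only [depth] at he_room he_stack
  u_walk hcode [hμ.vendor] until [Vorbis.L.start_decoder.cut4, Vorbis.L.start_decoder.cut272] span [Vorbis.L.textLo, Vorbis.L.textHi] side (v_side)
  · -- 0x116581: the check of `m->blockflag` (store1, rbx)
    have hun : ShadowUntouched s.mem s_116581.mem := by v_untouched
    refine check_field hinv0 hun _ (484 + 6 * i) 1 ?_ (by omega) (by omega)
    rw [n6]
    u_omega
  · -- the store misses the image's text
    right
    have e : (g.e.reg .rdi + UInt64.ofNat (484 + 6 * i)).toNat = (g.e.reg .rdi).toNat + (484 + 6 * i) := by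
      clear fw3
      u_omega
    omega
  · v_inv
  · -- the precondition of get_bits(f, 16)
    have hs : Inv g i A s_116591.mem := by
      rw [w_mem]
      refine Inv.push hfr hh (Inv.rec_store hfr hh (Inv.push hfr hh hinv0 _) _ 0 1 _ ?_ (by omega)) _
      rw [n6]
      u_omega
    refine getbits_pre hfr hh hs w_rsp w_rdi ?_
    rw [bitsArg_def, w_rsi]
    decide
  · -- 0x116596: get_bits returned
    have hs : Inv g i A s_116591.mem := by
      rw [w_mem_116591]
      refine Inv.push hfr hh (Inv.rec_store hfr hh (Inv.push hfr hh hinv0 _) _ 0 1 _ ?_ (by omega)) _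
      rw [n6]
      u_omega
    obtain ⟨hr, _⟩ := getbits_post hfr hh hs w_rsp_116591 w_rdi_116591 w_same w_post
    have hbf := bf_keep hfr hh hs w_rsp_116591 w_rdi_116591 w_same _ _ w_mem_116591
    rw [rec_addr, X86.User.Mem.u8_writeLE_same] at hbf
    refine hnext s_116591r ⟨w_rip, w_rsp, ?_, ?_, ?_, Vorbis.conv_code_eqOn w_code, w_inv, hr⟩ ?_
    · exact (w_kept .rbp rfl).trans c_rbp
    · exact (w_kept .r14 rfl).trans c_r14
    · exact (w_kept .rbx rfl).trans c_rbx
    · rw [hbf]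
      exact byte_le_one _ hrax


/-- Stage 3 (0x116596 – 0x1165b7, C lines 4146 – 4147): `m->windowtype = …` (store2 check, word store), `get_bits(f, 16)`. -/
theorem stage3 (Lay : Layout) (hLay : Lay.hi = 0x1000000) (μ : Microarch) (hμ : UserX.MicroOK μ) (u₀ : State)
    (hcode : HasCodeNat Lay u₀ Vorbis.L.start_decoder.entry Vorbis.Code.code_start_decoder.nat Vorbis.L.start_decoder.size)
    (g : Ghost) (i : Nat) (A : Arena × List Obj) (v : State)
    (hgb : Calls Lay μ Vorbis.WayInv (Vorbis.conv u₀) Vorbis.L.get_bits.entry (get_bits.spec A.2 g.frames' (g.Blk A) g.len))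
    (hst2 : Asan.SmallCheck Lay μ Vorbis.WayInv (Vorbis.CodeOK u₀) [.rax, .rcx, .rdx] 2 Vorbis.L.__asan_store2_noabort.entry)
    (hfr : Frame u₀ g pc_R14 A v) (hh : g.Hand A)
    (P : State → Prop) (s : State) (hst : Stage u₀ g i A Vorbis.L.start_decoder.cut313 s)
    (hbf : s.mem.u8 (g.f + 484 + 6 * i) ≤ 1)
    (hnext : ∀ r, Stage u₀ g i A Vorbis.L.start_decoder.cut314 r → r.mem.u8 (g.f + 484 + 6 * i) ≤ 1 →
      r.reg .r13 = g.e.reg .rdi + UInt64.ofNat (484 + 6 * i) + 2 → ReachVia Lay μ Vorbis.WayInv r P) :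
    ReachVia Lay μ Vorbis.WayInv s P := by
  have hinv0 := hst.mem
  have he := hfr.entry
  v_entry he
  obtain ⟨n1, n2, n3, n4, n5, n6⟩ := nums hfr
  obtain ⟨fw1, fw2, fw3⟩ := obj_where hfr hh hfr.shadow
  rw [n5] at n1 n2 n3 n4 fw3
  rw [n6] at fw1 fw2 fw3
  have hi64 : i < 64 := by
    have := hinv0.modes.MD1
    have := hinv0.lt
    omega
  have h_rip := hst.rip
  have c_rsp := hst.rsp
  have c_rbp := hst.rbp
  have c_r14 := hst.r14
  have c_rbx := hst.rbx
  have w_eq := hst.code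
  have hdf : s.flags .df = false := hst.inv.1
  have hmx : s.mxcsr &&& 0x1F80 = 0x1F80 := hst.inv.2
  have hsse := Vorbis.sseOK_of_abiInv hst.inv
  simp only [depth] at he_room he_stack
  u_walk hcode [hμ.vendor] until [Vorbis.L.start_decoder.cut4, Vorbis.L.start_decoder.cut272] span [Vorbis.L.textLo, Vorbis.L.textHi] side (v_side)
  · -- 0x1165a0: the check of the store (store2, rbx + 2)
    have hun : ShadowUntouched s.mem s_1165a0.mem := by v_untouched
    refine check_field hinv0 hun _ (484 + 6 * i + 2) 2 ?_ (by omega) (by omega)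
    rw [n6]
    u_omega
  · -- the store misses the image's text
    right
    have e : (g.e.reg .rdi + UInt64.ofNat (484 + 6 * i) + 2).toNat = (g.e.reg .rdi).toNat + (484 + 6 * i) + 2 := by
      clear fw3
      u_omega
    omega
  · v_inv
  · -- the precondition of get_bits(f, 16)
    have hs : Inv g i A s_1165b2.mem := by
      rw [w_mem]
      refine Inv.push hfr hh (Inv.rec_store hfr hh (Inv.push hfr hh hinv0 _) _ 2 2 _ ?_ (by omega)) _
      rw [n6]
      u_omega
    refine getbits_pre hfr hh hs w_rsp w_rdi ?_
    rw [bitsArg_def, w_rsi]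
    decide
  · -- get_bits returned
    have ea : (g.e.reg .rdi + UInt64.ofNat (484 + 6 * i) + 2).toNat = g.f + (484 + 6 * i) + 2 := by
      rw [n6]
      u_omega
    have hs : Inv g i A s_1165b2.mem := by
      rw [w_mem_1165b2]
      exact Inv.push hfr hh (Inv.rec_store hfr hh (Inv.push hfr hh hinv0 _) _ 2 2 _ ea (by omega)) _
    obtain ⟨hr, _⟩ := getbits_post hfr hh hs w_rsp_1165b2 w_rdi_1165b2 w_same w_post
    have hbf' := bf_keep hfr hh hs w_rsp_1165b2 w_rdi_1165b2 w_same _ _ w_mem_1165b2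
    rw [u8_rec_store g i _ _ 2 2 _ ea (by omega) (by omega) (by omega) hi64, u8_push hfr hh hinv0] at hbf'
    refine hnext s_1165b2r ⟨w_rip, w_rsp, ?_, ?_, ?_, Vorbis.conv_code_eqOn w_code, w_inv, hr⟩ ?_ ?_
    · exact (w_kept .rbp rfl).trans c_rbp
    · exact (w_kept .r14 rfl).trans c_r14
    · exact (w_kept .rbx rfl).trans c_rbx
    · rw [hbf']
      exact hbf
    · exact w_r13

/-- Stage 4 (0x1165b7 – 0x1165d5, C lines 4147 – 4148): `m->transformtype = …` (store2 check, word store), `get_bits(f, 8)`. -/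
theorem stage4 (Lay : Layout) (hLay : Lay.hi = 0x1000000) (μ : Microarch) (hμ : UserX.MicroOK μ) (u₀ : State)
    (hcode : HasCodeNat Lay u₀ Vorbis.L.start_decoder.entry Vorbis.Code.code_start_decoder.nat Vorbis.L.start_decoder.size)
    (g : Ghost) (i : Nat) (A : Arena × List Obj) (v : State)
    (hgb : Calls Lay μ Vorbis.WayInv (Vorbis.conv u₀) Vorbis.L.get_bits.entry (get_bits.spec A.2 g.frames' (g.Blk A) g.len))
    (hst2 : Asan.SmallCheck Lay μ Vorbis.WayInv (Vorbis.CodeOK u₀) [.rax, .rcx, .rdx] 2 Vorbis.L.__asan_store2_noabort.entry)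
    (hfr : Frame u₀ g pc_R14 A v) (hh : g.Hand A)
    (P : State → Prop) (s : State) (hst : Stage u₀ g i A Vorbis.L.start_decoder.cut314 s)
    (hbf : s.mem.u8 (g.f + 484 + 6 * i) ≤ 1) (hr13 : s.reg .r13 = g.e.reg .rdi + UInt64.ofNat (484 + 6 * i) + 2)
    (hnext : ∀ r, Stage u₀ g i A Vorbis.L.start_decoder.cut315 r → r.mem.u8 (g.f + 484 + 6 * i) ≤ 1 →
      r.reg .r13 = g.e.reg .rdi + UInt64.ofNat (484 + 6 * i) + 2 → ReachVia Lay μ Vorbis.WayInv r P) :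
    ReachVia Lay μ Vorbis.WayInv s P := by
  have hinv0 := hst.mem
  have he := hfr.entry
  v_entry he
  obtain ⟨n1, n2, n3, n4, n5, n6⟩ := nums hfr
  obtain ⟨fw1, fw2, fw3⟩ := obj_where hfr hh hfr.shadow
  rw [n5] at n1 n2 n3 n4 fw3
  rw [n6] at fw1 fw2 fw3
  have hi64 : i < 64 := by
    have := hinv0.modes.MD1
    have := hinv0.lt
    omega
  have h_rip := hst.rip
  have c_rsp := hst.rsp
  have c_rbp := hst.rbp
  have c_r14 := hst.r14
  have c_rbx := hst.rbx
  have w_eq := hst.code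
  have hdf : s.flags .df = false := hst.inv.1
  have hmx : s.mxcsr &&& 0x1F80 = 0x1F80 := hst.inv.2
  have hsse := Vorbis.sseOK_of_abiInv hst.inv
  simp only [depth] at he_room he_stack
  have c_r13 := hr13
  u_walk hcode [hμ.vendor] until [Vorbis.L.start_decoder.cut4, Vorbis.L.start_decoder.cut272] span [Vorbis.L.textLo, Vorbis.L.textHi] side (v_side)
  · -- 0x1165be: the check of the store (store2, rbx + 4)
    have hun : ShadowUntouched s.mem s_1165be.mem := by v_untouched
    refine check_field hinv0 hun _ (484 + 6 * i + 4) 2 ?_ (by omega) (by omega)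
    rw [n6]
    u_omega
  · -- the store misses the image's text
    right
    have e : (g.e.reg .rdi + UInt64.ofNat (484 + 6 * i) + 4).toNat = (g.e.reg .rdi).toNat + (484 + 6 * i) + 4 := by
      clear fw3
      u_omega
    omega
  · v_inv
  · -- the precondition of get_bits(f, 8)
    have hs : Inv g i A s_1165d0.mem := by
      rw [w_mem]
      refine Inv.push hfr hh (Inv.rec_store hfr hh (Inv.push hfr hh hinv0 _) _ 4 2 _ ?_ (by omega)) _
      rw [n6]
      u_omega
    refine getbits_pre hfr hh hs w_rsp w_rdi ?_
    rw [bitsArg_def, w_rsi]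
    decide
  · -- get_bits returned
    have ea : (g.e.reg .rdi + UInt64.ofNat (484 + 6 * i) + 4).toNat = g.f + (484 + 6 * i) + 4 := by
      rw [n6]
      u_omega
    have hs : Inv g i A s_1165d0.mem := by
      rw [w_mem_1165d0]
      exact Inv.push hfr hh (Inv.rec_store hfr hh (Inv.push hfr hh hinv0 _) _ 4 2 _ ea (by omega)) _
    obtain ⟨hr, _⟩ := getbits_post hfr hh hs w_rsp_1165d0 w_rdi_1165d0 w_same w_post
    have hbf' := bf_keep hfr hh hs w_rsp_1165d0 w_rdi_1165d0 w_same _ _ w_mem_1165d0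
    rw [u8_rec_store g i _ _ 4 2 _ ea (by omega) (by omega) (by omega) hi64, u8_push hfr hh hinv0] at hbf'
    refine hnext s_1165d0r ⟨w_rip, w_rsp, ?_, ?_, ?_, Vorbis.conv_code_eqOn w_code, w_inv, hr⟩ ?_ ?_
    · exact (w_kept .rbp rfl).trans c_rbp
    · exact (w_kept .r14 rfl).trans c_r14
    · exact (w_kept .rbx rfl).trans c_rbx
    · rw [hbf']
      exact hbf
    · exact (w_kept .r13 rfl).trans c_r13


/-! ### Stage 5: the last store, the three tests, the two exits -/


/-- A byte zero-extended to 32 bits is its own (non-negative) signed value. -/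
theorem zext8_toInt (b : BitVec 8) : (BitVec.zeroExtend 32 b).toInt = (b.toNat : Int) := by
  have hb := b.isLt
  rw [BitVec.toInt_eq_toNat_cond, BitVec.toNat_setWidth]
  have e : b.toNat % 2 ^ 32 = b.toNat := Nat.mod_eq_of_lt (by omega)
  rw [e]
  split <;> omega

/-- **MD2 for the record just parsed**: the memory at the back edge is the memory `m` at the return of the fourth `get_bits` with
the byte `m->mapping` stored (and return addresses pushed below the steady stack pointer, off `*f`). `blockflag ≤ 1` was stored
in stage 2, the two words were tested zero (`hw`, `ht`), the byte was tested below `mapping_count` (`hm`). -/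
theorem rec_ok (m : Mem) (f i : Nat) (sp : Word) (x y y' z : Nat) (b : BitVec 8) (hi : i < 64) (hf : f + 1808 ≤ 0xC00000)
    (hsp : sp.toNat + 8 ≤ f ∨ f + 1808 ≤ sp.toNat) (hsp2 : sp.toNat + 8 ≤ 2 ^ 64)
    (hbf : m.u8 (f + 484 + 6 * i) ≤ 1)
    (hw : (((m.writeLE sp 8 x).writeLE (addr (f + 484 + 6 * i + 1)) 1 b.toNat).writeLE sp 8 y).u16 (f + 484 + 6 * i + 2)
      % 65536 = 0)
    (ht : (((m.writeLE sp 8 x).writeLE (addr (f + 484 + 6 * i + 1)) 1 b.toNat).writeLE sp 8 y').u16 (f + 484 + 6 * i + 4)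
      % 65536 = 0)
    (hm : (BitVec.zeroExtend 32 b).toInt <
      (BitVec.ofNat 32 (((m.writeLE sp 8 x).writeLE (addr (f + 484 + 6 * i + 1)) 1 b.toNat).u32 (f + 464))).toInt) :
    ModeRecOK (((m.writeLE sp 8 x).writeLE (addr (f + 484 + 6 * i + 1)) 1 b.toNat).writeLE sp 8 z) f i := by
  have ea : (addr (f + 484 + 6 * i + 1)).toNat = f + 484 + 6 * i + 1 := toNat_addr _ (by omega)
  have hb := b.isLt
  generalize hM : (m.writeLE sp 8 x).writeLE (addr (f + 484 + 6 * i + 1)) 1 b.toNat = M at hw ht hm ⊢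
  unfold ModeRecOK
  simp only [vacc, voff]
  refine ⟨?_, ?_, ?_, ?_⟩
  · -- blockflag: offset 0 of the record, written in stage 2
    rw [Mem.u8_writeLE _ _ _ _ _ hsp2 (by omega) (by omega), ← hM]
    rw [Mem.u8_writeLE _ _ _ _ _ (by omega) (by omega) (by omega)]
    rw [Mem.u8_writeLE _ _ _ _ _ hsp2 (by omega) (by omega)]
    exact hbf
  · -- mapping: the byte just stored, tested below mapping_count
    rw [Mem.u8_writeLE _ _ _ _ _ hsp2 (by omega) (by omega)]
    rw [Mem.i32_writeLE _ _ _ _ _ hsp2 (by omega) (by omega)]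
    rw [Mem.toInt_ofNat32_u32, zext8_toInt] at hm
    have e1 : M.u8 (f + 484 + 6 * i + 1) = b.toNat := by
      rw [← hM, Mem.u8_writeLE_same]
      exact Nat.mod_eq_of_lt hb
    rw [e1]
    exact hm
  · -- windowtype: tested zero
    rw [Mem.u16_writeLE _ _ _ _ _ hsp2 (by omega) (by omega)]
    rw [Mem.u16_writeLE _ _ _ _ _ hsp2 (by omega) (by omega)] at hw
    have := M.u16_lt (f + 484 + 6 * i + 2)
    omega
  · -- transformtype: tested zero
    rw [Mem.u16_writeLE _ _ _ _ _ hsp2 (by omega) (by omega)]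
    rw [Mem.u16_writeLE _ _ _ _ _ hsp2 (by omega) (by omega)] at ht
    have := M.u16_lt (f + 484 + 6 * i + 4)
    omega


/-- The memory of stage 5 — the memory `m` at the return of the fourth `get_bits`, with the byte `m->mapping` stored between two
pushed return addresses — keeps the carried invariant. -/
theorem inv5 {u₀ : State} {g : Ghost} {pc : Word} {i : Nat} {A : Arena × List Obj} {v : State} {mem : Mem}
    (hfr : Frame u₀ g pc A v) (hh : g.Hand A) (h : Inv g i A mem) (x b z : Nat) :
    Inv g i A (((mem.writeLE (g.e.reg .rsp - 1488) 8 x).writeLE (g.e.reg .rdi + UInt64.ofNat (484 + 6 * i) + 1) 1 b).writeLE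
      (g.e.reg .rsp - 1488) 8 z) := by
  obtain ⟨n1, n2, n3, n4, n5, n6⟩ := nums hfr
  obtain ⟨fw1, fw2, _⟩ := obj_where hfr hh h.shadow
  have hmd1 := h.modes.MD1
  have hlt := h.lt
  have hi64 : i < 64 := by omega
  have ea : (g.e.reg .rdi + UInt64.ofNat (484 + 6 * i) + 1).toNat = g.f + (484 + 6 * i) + 1 := by
    rw [n6] at fw1 fw2 ⊢
    u_omega
  exact Inv.push hfr hh (Inv.rec_store hfr hh (Inv.push hfr hh h x) _ 1 1 b ea (by omega)) z

/-- No store of stage 5 (two pushed return addresses, the byte `m->mapping`) goes to the shadow. -/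
theorem un5 (m : Mem) (sp a : Word) (x b z : Nat) (hsp : sp.toNat + 8 ≤ 0xC00000) (ha : a.toNat + 1 ≤ 0xC00000) :
    ShadowUntouched m (((m.writeLE sp 8 x).writeLE a 1 b).writeLE sp 8 z) := by
  unfold ShadowUntouched
  refine Mem.EqOn.step_writeLE _ _ _ (Mem.EqOn.step_writeLE _ _ _ (Mem.EqOn.step_writeLE _ _ _ (Mem.EqOn.refl _ _ _) ?_ ?_) ?_ ?_) ?_ ?_
  all_goals omega

/-- Stage 5 (0x1165d5 – 0x116657, C lines 4148 – 4151, 4143): `m->mapping = …` (store1 check, byte store), the three tests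
(`windowtype`, `transformtype`, `mapping < mapping_count`; each failing arm `error(f, VORBIS_invalid_setup) ; jmp 113b22` = `AtERR`),
`++i ; jmp 115f67` = `AtR13 (i + 1)` with MD2 for record `i`. -/
theorem stage5 (Lay : Layout) (hLay : Lay.hi = 0x1000000) (μ : Microarch) (hμ : UserX.MicroOK μ) (u₀ : State)
    (hcode : HasCodeNat Lay u₀ Vorbis.L.start_decoder.entry Vorbis.Code.code_start_decoder.nat Vorbis.L.start_decoder.size)
    (g : Ghost) (i : Nat) (A : Arena × List Obj) (v : State)
    (hst1 : Asan.SmallCheck Lay μ Vorbis.WayInv (Vorbis.CodeOK u₀) [.rax, .rdx] 1 Vorbis.L.__asan_store1_noabort.entry)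
    (hld2 : Asan.SmallCheck Lay μ Vorbis.WayInv (Vorbis.CodeOK u₀) [.rax, .rcx, .rdx] 2 Vorbis.L.__asan_load2_noabort.entry)
    (herr : Calls Lay μ Vorbis.WayInv (Vorbis.conv u₀) Vorbis.L.error.entry (error.spec A.2 g.frames'))
    (hld4 : Asan.SmallCheck Lay μ Vorbis.WayInv (Vorbis.CodeOK u₀) [.rax, .rcx, .rdx] 4 Vorbis.L.__asan_load4_noabort.entry)
    (hfr : Frame u₀ g pc_R14 A v) (hh : g.Hand A)
    (s : State) (hst : Stage u₀ g i A Vorbis.L.start_decoder.cut315 s)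
    (hbf : s.mem.u8 (g.f + 484 + 6 * i) ≤ 1) (hr13 : s.reg .r13 = g.e.reg .rdi + UInt64.ofNat (484 + 6 * i) + 2) :
    ReachVia Lay μ Vorbis.WayInv s (fun w => AtR13 u₀ g (i + 1) w ∨ AtERR u₀ g w) := by
  have hinv0 := hst.mem
  have he := hfr.entry
  v_entry he
  obtain ⟨n1, n2, n3, n4, n5, n6⟩ := nums hfr
  obtain ⟨fw1, fw2, fw3⟩ := obj_where hfr hh hfr.shadow
  rw [n5] at n1 n2 n3 n4 fw3
  rw [n6] at fw1 fw2 fw3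
  have hi64 : i < 64 := by
    have := hinv0.modes.MD1
    have := hinv0.lt
    omega
  have h_rip := hst.rip
  have c_rsp := hst.rsp
  have c_rbp := hst.rbp
  have c_r14 := hst.r14
  have c_rbx := hst.rbx
  have w_eq := hst.code
  have hdf : s.flags .df = false := hst.inv.1
  have hmx : s.mxcsr &&& 0x1F80 = 0x1F80 := hst.inv.2
  have hsse := Vorbis.sseOK_of_abiInv hst.inv
  simp only [depth] at he_room he_stack
  have c_r13 := hr13
  u_walk hcode [hμ.vendor] until [Vorbis.L.start_decoder.cut4, Vorbis.L.start_decoder.cut272] span [Vorbis.L.textLo, Vorbis.L.textHi] side (v_side)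
  · -- 0x1165dc: the check of the store `m->mapping` (store1, rbx + 1)
    have hun : ShadowUntouched s.mem s_1165dc.mem := by
      clear fw3
      v_untouched
    refine check_field hinv0 hun _ (484 + 6 * i + 1) 1 ?_ (by omega) (by omega)
    rw [n6]
    clear fw3
    u_omega
  · -- the store misses the image's text
    right
    have e : (g.e.reg .rdi + UInt64.ofNat (484 + 6 * i) + 1).toNat = (g.e.reg .rdi).toNat + (484 + 6 * i) + 1 := by
      clear fw3
      u_omega
    omega
  · -- 0x1165e8: the check of `m->windowtype` (load2, r13 = rbx + 2)
    have hun : ShadowUntouched s.mem s_1165e8.mem := by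
      rw [w_mem]
      have e : (g.e.reg .rdi + UInt64.ofNat (484 + 6 * i) + 1).toNat = (g.e.reg .rdi).toNat + (484 + 6 * i) + 1 := by
        clear fw3
        u_omega
      refine un5 _ _ _ _ _ _ ?_ ?_
      · clear fw3
        u_omega
      · omega
    refine check_field hinv0 hun _ (484 + 6 * i + 2) 2 ?_ (by omega) (by omega)
    rw [n6]
    clear fw3
    u_omega
  · -- 0x11660a: the check of `m->transformtype` (load2, rbx + 4)
    have hun : ShadowUntouched s.mem s_11660a.mem := by
      rw [w_mem]
      have e : (g.e.reg .rdi + UInt64.ofNat (484 + 6 * i) + 1).toNat = (g.e.reg .rdi).toNat + (484 + 6 * i) + 1 := by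
        clear fw3
        u_omega
      refine un5 _ _ _ _ _ _ ?_ ?_
      · clear fw3
        u_omega
      · omega
    refine check_field hinv0 hun _ (484 + 6 * i + 4) 2 ?_ (by omega) (by omega)
    rw [n6]
    clear fw3
    u_omega
  · -- 0x116633: the check of `f->mapping_count` (load4, rbp + 0x1d0)
    have hun : ShadowUntouched s.mem s_116633.mem := by
      rw [w_mem]
      have e : (g.e.reg .rdi + UInt64.ofNat (484 + 6 * i) + 1).toNat = (g.e.reg .rdi).toNat + (484 + 6 * i) + 1 := by
        clear fw3
        u_omega
      refine un5 _ _ _ _ _ _ ?_ ?_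
      · clear fw3
        u_omega
      · omega
    refine check_field hinv0 hun _ (464) 4 ?_ (by omega) (by omega)
    rw [n6]
    clear fw3
    u_omega
  · v_inv
  · -- the precondition of error(f, VORBIS_invalid_setup) at 0x116649
    have hs : Inv g i A s_116649.mem := by
      rw [w_mem]
      exact inv5 hfr hh hinv0 _ _ _
    exact error_pre hfr hh hs w_rsp w_rdi
  · v_inv
  · -- the precondition of error(f, VORBIS_invalid_setup) at 0x11661e
    have hs : Inv g i A s_11661e.mem := by
      rw [w_mem]
      exact inv5 hfr hh hinv0 _ _ _
    exact error_pre hfr hh hs w_rsp w_rdi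
  · v_inv
  · -- the precondition of error(f, VORBIS_invalid_setup) at 0x1165fc
    have hs : Inv g i A s_1165fc.mem := by
      rw [w_mem]
      exact inv5 hfr hh hinv0 _ _ _
    exact error_pre hfr hh hs w_rsp w_rdi
  · -- 0x116657: `++i ; jmp 115f67`: the exit to the loop head with MD2 for record `i`
    have e1 : g.e.reg .rdi + UInt64.ofNat (484 + 6 * i) + 1 = addr (g.f + 484 + 6 * i + 1) := by
      rw [rec_addr]
      exact addr_add _ 1
    have e2 : g.e.reg .rdi + UInt64.ofNat (484 + 6 * i) + 2 = addr (g.f + 484 + 6 * i + 2) := by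
      rw [rec_addr]
      exact addr_add _ 2
    have e4 : g.e.reg .rdi + UInt64.ofNat (484 + 6 * i) + 4 = addr (g.f + 484 + 6 * i + 4) := by
      rw [rec_addr]
      exact addr_add _ 4
    have ec : g.e.reg .rdi + 464 = addr (g.f + 464) := by
      have e : g.e.reg .rdi = addr g.f := (addr_toNat _).symm
      rw [e]
      exact addr_add _ 464
    have esp : (g.e.reg .rsp - 1488).toNat = (g.e.reg .rsp).toNat - 1488 := by
      clear fw3
      u_omega
    rw [e1, e2] at hbr_1165f2
    rw [e1, e4] at hbr_116614
    rw [e1, ec] at hbr_11663f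
    rw [e1] at w_mem
    have hrec : ModeRecOK s_116657.mem g.f i := by
      rw [w_mem]
      refine rec_ok s.mem g.f i _ _ _ _ _ _ hi64 (by omega) ?_ (by omega) hbf hbr_1165f2 hbr_116614 hbr_11663f
      rw [esp]
      omega
    have hs : Inv g i A s_116657.mem := by
      rw [w_mem, ← e1]
      exact inv5 hfr hh hinv0 _ _ _
    refine ReachVia.done (Or.inl (exit_next hfr hh hs w_rip w_rsp w_eq ?_ ?_ ?_ hrec))
    · v_inv
    · exact (w_kept .rbp rfl).trans c_rbp
    · exact w_r14.trans (cnt32_succ i (by omega))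
  · -- 0x116649+5: `error` returned (C line 4151); `jmp 113b22` with eax = 0
    have hs : Inv g i A s_116649.mem := by
      rw [w_mem_116649]
      exact inv5 hfr hh hinv0 _ _ _
    have hr := error_post hfr hh hs w_rsp_116649 w_rdi_116649 w_same
    have w_rax : s_116649r.reg .rax = 0 := w_post.1
    v_after_call w_rsp_116649 w_mem_116649
    u_walk hcode [hμ.vendor] until [Vorbis.L.start_decoder.cut4, Vorbis.L.start_decoder.cut272] span [Vorbis.L.textLo, Vorbis.L.textHi] side (v_side)
    refine ReachVia.done (Or.inr (exit_err (i := i) hfr hh ?_ w_rip w_rsp w_eq ?_ ?_))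
    · rw [w_mem]
      exact hr
    · v_inv
    · exact w_rax
  · -- 0x11661e+5: `error` returned (C line 4150); `jmp 113b22` with eax = 0
    have hs : Inv g i A s_11661e.mem := by
      rw [w_mem_11661e]
      exact inv5 hfr hh hinv0 _ _ _
    have hr := error_post hfr hh hs w_rsp_11661e w_rdi_11661e w_same
    have w_rax : s_11661er.reg .rax = 0 := w_post.1
    v_after_call w_rsp_11661e w_mem_11661e
    u_walk hcode [hμ.vendor] until [Vorbis.L.start_decoder.cut4, Vorbis.L.start_decoder.cut272] span [Vorbis.L.textLo, Vorbis.L.textHi] side (v_side)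
    refine ReachVia.done (Or.inr (exit_err (i := i) hfr hh ?_ w_rip w_rsp w_eq ?_ ?_))
    · rw [w_mem]
      exact hr
    · v_inv
    · exact w_rax
  · -- 0x1165fc+5: `error` returned (C line 4149); `jmp 113b22` with eax = 0
    have hs : Inv g i A s_1165fc.mem := by
      rw [w_mem_1165fc]
      exact inv5 hfr hh hinv0 _ _ _
    have hr := error_post hfr hh hs w_rsp_1165fc w_rdi_1165fc w_same
    have w_rax : s_1165fcr.reg .rax = 0 := w_post.1
    v_after_call w_rsp_1165fc w_mem_1165fc
    u_walk hcode [hμ.vendor] until [Vorbis.L.start_decoder.cut4, Vorbis.L.start_decoder.cut272] span [Vorbis.L.textLo, Vorbis.L.textHi] side (v_side)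
    refine ReachVia.done (Or.inr (exit_err (i := i) hfr hh ?_ w_rip w_rsp w_eq ?_ ?_))
    · rw [w_mem]
      exact hr
    · v_inv
    · exact w_rax

end Vorbis.Spec.start_decoder_R14
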